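-- pv_equiv track=rewrite | github.com/bwebste/gelfand-tsetlin-public | tryagain-remote.py | generate_decreasing_sequences
-- ===== SOURCE A (Python) =====
-- def generate_decreasing_sequences(max_val):
--     """Generate all strictly decreasing consecutive sequences of given length with maximum value"""
--     GL= []
--     GL_prime = []
--     for top in range(1, max_val):
--         for first in range(1, top+1):
--             sequence = list(range(top,first-1, -1))
--             GL.append(sequence)
--     top=max_val
--     for first in range(1, top+1):
--             sequence = list(range(top,first-1, -1))
--             GL_prime.append(sequence)
--     return [GL, GL_prime]
-- ===== SOURCE B (Python) =====
-- def generate_decreasing_sequences(max_val):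
--     """Generate all strictly decreasing consecutive sequences of given length with maximum value"""
--     GL = []
--     row = []
--     for top in range(1, max_val + 1):
--         # every sequence with maximum `top` extends a sequence with maximum top-1 by one element
--         row = [[top] + s for s in row] + [[top]]
--         if top < max_val:
--             GL.extend(row)
--     return [GL, row]
-- ===== Notes on version B (the rewrite author's own statement) =====
-- stated objective: alternative
-- what changed: B never calls range to build a sequence: it computes the group for each top by dynamic programming from the previous top's group (prepending top to each previously built sequence and adding the singleton [top]), in one single loop with two accumulators, instead of A's two separate nested loops each materialising a fresh range per (top, first) pair.
import Mathlib
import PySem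

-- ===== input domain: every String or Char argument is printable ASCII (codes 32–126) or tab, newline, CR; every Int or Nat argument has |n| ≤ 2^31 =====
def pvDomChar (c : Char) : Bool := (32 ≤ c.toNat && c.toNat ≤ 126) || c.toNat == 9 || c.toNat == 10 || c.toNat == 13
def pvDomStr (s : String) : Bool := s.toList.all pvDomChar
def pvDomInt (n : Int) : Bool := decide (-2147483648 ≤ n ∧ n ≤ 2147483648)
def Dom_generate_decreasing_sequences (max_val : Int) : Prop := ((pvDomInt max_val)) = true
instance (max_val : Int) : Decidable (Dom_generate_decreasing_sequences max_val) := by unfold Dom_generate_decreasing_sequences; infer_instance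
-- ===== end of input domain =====

-- B computes each top's group by dynamic programming from the previous top's group
-- (prepend top, add the singleton), in one loop with two accumulators; it never builds
-- a range per (top, first) pair as A does (objective: alternative).

-- ===== PORT A =====
def generate_decreasing_sequences (max_val : Int) : List (List (List Int)) :=
  let gl : List (List Int) :=
    (PySem.List.pyRange 1 max_val 1).foldl (fun acc top =>
      (PySem.List.pyRange 1 (top + 1) 1).foldl (fun acc first =>
        acc ++ [PySem.List.pyRange top (first - 1) (-1)]) acc) []
  let top := max_val
  let gl_prime : List (List Int) :=
    (PySem.List.pyRange 1 (top + 1) 1).foldl (fun acc first =>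
      acc ++ [PySem.List.pyRange top (first - 1) (-1)]) []
  [gl, gl_prime]

-- ===== PORT B =====
-- one loop, two accumulators (GL, row); row = [[top]+s for s in row] + [[top]]
def generate_decreasing_sequences_alt (max_val : Int) : List (List (List Int)) :=
  let st : List (List Int) × List (List Int) :=
    (PySem.List.pyRange 1 (max_val + 1) 1).foldl
      (fun (p : List (List Int) × List (List Int)) top =>
        let row := (p.2.map (fun s => top :: s)) ++ [[top]]
        (if top < max_val then p.1 ++ row else p.1, row)) ([], [])
  [st.1, st.2]

-- ===== PRECONDITION & SPEC =====
def Spec_generate_decreasing_sequences (max_val : Int) (out : List (List (List Int))) : Prop := out = generate_decreasing_sequences_alt max_val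
instance (max_val : Int) (out : List (List (List Int))) : Decidable (Spec_generate_decreasing_sequences max_val out) := by unfold Spec_generate_decreasing_sequences; infer_instance

-- ===== CLAIM (what is proved, stated in full; the proofs are below) =====
def Claim_equal_generate_decreasing_sequences : Prop := ∀ (max_val : Int), Dom_generate_decreasing_sequences max_val → Spec_generate_decreasing_sequences max_val (generate_decreasing_sequences max_val)

-- ===== LEMMAS AND PROOFS =====

-- A's group for one top, in closed form (the inner append loop is a map).
def pvR (top : Int) : List (List Int) :=
  (PySem.List.pyRange 1 (top + 1) 1).map (fun first => PySem.List.pyRange top (first - 1) (-1))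

lemma pv_inner (acc : List (List Int)) (top : Int) :
    (PySem.List.pyRange 1 (top + 1) 1).foldl (fun acc first =>
        acc ++ [PySem.List.pyRange top (first - 1) (-1)]) acc
      = acc ++ pvR top := by
  rw [PySem.List.foldl_append_singleton_eq_map]; rfl

-- B's row step reproduces A's group: prepending top+1 to each member of pvR top
-- and adding the singleton gives pvR (top+1).
lemma pv_step (top : Int) (h : 0 ≤ top) :
    ((pvR top).map (fun s => (top + 1) :: s)) ++ [[top + 1]] = pvR (top + 1) := by
  unfold pvR
  rw [show top + 1 + 1 = (top + 1) + 1 from rfl,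
      PySem.List.pyRange_one_succ_right (a := 1) (b := top + 1) (by omega)]
  rw [List.map_append, List.map_map]
  congr 1
  · refine List.map_congr_left ?_
    intro first hf
    rw [PySem.List.mem_pyRange_one] at hf
    simp only [Function.comp]
    conv_rhs => rw [PySem.List.pyRange_neg_one_cons (show first - 1 < top + 1 by omega)]
    norm_num
  · simp only [List.map_cons, List.map_nil]
    rw [show ((top : Int) + 1 - 1) = top from by ring,
        PySem.List.pyRange_neg_one_cons (show (top : Int) < top + 1 by omega),
        show ((top + 1 : Int) - 1) = top from by ring,
        PySem.List.pyRange_neg_one_eq_nil (le_refl (top : Int))]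

-- A's GL restricted to tops 1..k, in fold form.
def pvGL (k : Int) : List (List Int) :=
  (PySem.List.pyRange 1 (k + 1) 1).foldl (fun acc top => acc ++ pvR top) []

-- A's outer loop equals pvGL.
lemma pv_A (m : Int) :
    (PySem.List.pyRange 1 (m + 1) 1).foldl (fun acc top =>
      (PySem.List.pyRange 1 (top + 1) 1).foldl (fun acc first =>
        acc ++ [PySem.List.pyRange top (first - 1) (-1)]) acc) []
    = pvGL m := by
  unfold pvGL
  exact PySem.List.foldl_congr_mem _ _ _ _ (fun acc x _ => pv_inner acc x)

-- Invariant of B's single loop over tops 1..k (with the unconditional step).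
lemma pv_loop (k : Nat) :
    (PySem.List.pyRange 1 ((k : Int) + 1) 1).foldl
        (fun (p : List (List Int) × List (List Int)) top =>
          ((p.1 ++ ((p.2.map (fun s => top :: s)) ++ [[top]])),
            (p.2.map (fun s => top :: s)) ++ [[top]])) ([], [])
      = (pvGL (k : Int), pvR (k : Int)) := by
  induction k with
  | zero =>
      simp [pvGL, pvR]
  | succ n ih =>
      have hsplit : PySem.List.pyRange 1 ((n : Int) + 1 + 1) 1
          = PySem.List.pyRange 1 ((n : Int) + 1) 1 ++ [(n : Int) + 1] :=
        PySem.List.pyRange_one_succ_right (by omega)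
      have hstep := pv_step (n : Int) (by omega)
      push_cast
      rw [hsplit, List.foldl_append, ih, List.foldl_cons, List.foldl_nil]
      have hgl : pvGL ((n : Int) + 1) = pvGL (n : Int) ++ pvR ((n : Int) + 1) := by
        unfold pvGL
        rw [PySem.List.pyRange_one_succ_right (a := 1) (b := (n : Int) + 1) (by omega),
          List.foldl_append, List.foldl_cons, List.foldl_nil]
      simp only [hstep, hgl]

-- B's whole fold, for a positive max_val = k + 1.
lemma pv_B (k : Nat) :
    (PySem.List.pyRange 1 ((k : Int) + 1 + 1) 1).foldl
      (fun (p : List (List Int) × List (List Int)) top =>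
        let row := (p.2.map (fun s => top :: s)) ++ [[top]]
        (if top < (k : Int) + 1 then p.1 ++ row else p.1, row)) ([], [])
    = (pvGL (k : Int), pvR ((k : Int) + 1)) := by
  rw [PySem.List.pyRange_one_succ_right (a := 1) (b := (k : Int) + 1) (by omega),
      List.foldl_append]
  have h1 := PySem.List.foldl_congr_mem
    (PySem.List.pyRange 1 ((k : Int) + 1) 1)
    (fun (p : List (List Int) × List (List Int)) top =>
        let row := (p.2.map (fun s => top :: s)) ++ [[top]]
        (if top < (k : Int) + 1 then p.1 ++ row else p.1, row))
    (fun (p : List (List Int) × List (List Int)) top =>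
        ((p.1 ++ ((p.2.map (fun s => top :: s)) ++ [[top]])),
          (p.2.map (fun s => top :: s)) ++ [[top]]))
    (([], []) : List (List Int) × List (List Int))
    (fun acc x hx => by
      rw [PySem.List.mem_pyRange_one] at hx
      simp only [if_pos (show x < (k : Int) + 1 by omega)])
  rw [h1, pv_loop k, List.foldl_cons, List.foldl_nil]
  simp only [if_neg (lt_irrefl ((k : Int) + 1)), pv_step (k : Int) (by omega)]

-- ===== VERDICT (by name: the statement is the Claim_ definition above) =====
theorem generate_decreasing_sequences_spec : Claim_equal_generate_decreasing_sequences := by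
  intro max_val _
  unfold Spec_generate_decreasing_sequences generate_decreasing_sequences generate_decreasing_sequences_alt
  by_cases hpos : 1 ≤ max_val
  · obtain ⟨k, hk⟩ : ∃ k : Nat, max_val = (k : Int) + 1 :=
      ⟨(max_val - 1).toNat, by omega⟩
    subst hk
    dsimp only
    rw [pv_A (k : Int), pv_inner, pv_B k]
    simp [List.nil_append]
  · dsimp only
    rw [PySem.List.pyRange_one_eq_nil (show max_val ≤ 1 by omega),
        PySem.List.pyRange_one_eq_nil (show max_val + 1 ≤ 1 by omega)]
    rfl
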